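-- pv_equiv track=rewrite | github.com/bcking92/TIL | 01_Algorithm/algo-study/upside_down.py | solution
-- ===== SOURCE A (Python) =====
-- def solution(input):
--     zero, one, now = 0, 0, -1
--     for i in input:
--         if i == '0':
--             if now != '0':
--                 zero += 1
--                 now = '0'
--             else:
--                 continue
--         else:
--             if now!= '1':
--                 one += 1
--                 now = '1'
--             else:
--                 continue
--     return min(zero, one)
-- ===== SOURCE B (Python) =====
-- def solution(input):
--     # Runs of '0' vs non-'0' alternate, so min(#zero-runs, #one-runs) is
--     # simply half (floor) of the total number of runs, i.e. (t+1)//2 where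
--     # t is the number of adjacent positions whose chars differ in '0'-ness.
--     if not input:
--         return 0
--     t = sum((a == '0') != (b == '0') for a, b in zip(input, input[1:]))
--     return (t + 1) // 2
-- ===== Notes on version B (the rewrite author's own statement) =====
-- stated objective: simpler
-- what changed: Instead of tracking a run-state and separate zero/one run counters and taking min, B counts adjacent '0'-ness transitions and returns the closed form (transitions+1)//2 (0 for empty), using the fact that runs alternate so the minority count is floor(total_runs/2).
import Mathlib
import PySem

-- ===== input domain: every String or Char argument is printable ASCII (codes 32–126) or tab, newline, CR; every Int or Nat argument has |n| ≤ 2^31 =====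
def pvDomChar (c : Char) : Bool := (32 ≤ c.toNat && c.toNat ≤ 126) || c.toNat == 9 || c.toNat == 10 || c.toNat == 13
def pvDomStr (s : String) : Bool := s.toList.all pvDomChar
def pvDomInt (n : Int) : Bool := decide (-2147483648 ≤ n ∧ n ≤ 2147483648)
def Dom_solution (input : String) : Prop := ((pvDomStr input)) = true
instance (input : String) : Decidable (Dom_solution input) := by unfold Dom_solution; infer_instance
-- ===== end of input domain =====

-- B replaces A's run-state loop with separate zero/one counters by counting adjacent '0'-ness transitions and the closed form (t+1)//2 (simpler; same cost).


-- ===== PORT A =====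
-- now starts as -1 (neither '0' nor '1'): ported as Option Char, none = -1.
def solutionLoopA : List Char → Int → Int → Option Char → Int
  | [], zero, one, _ => min zero one
  | c :: rest, zero, one, now =>
    if c = '0' then
      if now ≠ some '0' then solutionLoopA rest (zero + 1) one (some '0')
      else solutionLoopA rest zero one now
    else
      if now ≠ some '1' then solutionLoopA rest zero (one + 1) (some '1')
      else solutionLoopA rest zero one now

def solution (input : String) : Int := solutionLoopA input.toList 0 0 none

-- ===== PORT B =====
-- t = sum over adjacent pairs of ((a == '0') != (b == '0')); result (t+1)//2, 0 for empty.
def solution_alt (input : String) : Int :=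
  let l := input.toList
  if l = [] then 0
  else
    let t := (l.zip l.tail).foldl
      (fun acc p => acc + (if (decide (p.1 = '0')) ≠ (decide (p.2 = '0')) then 1 else 0)) (0 : Int)
    PySem.Int.floordiv (t + 1) 2

-- ===== PRECONDITION & SPEC =====
def Spec_solution (input : String) (out : Int) : Prop := out = solution_alt input
instance (input : String) (out : Int) : Decidable (Spec_solution input out) := by unfold Spec_solution; infer_instance

-- ===== CLAIM (what is proved, stated in full; the proofs are below) =====
def Claim_equal_solution : Prop := ∀ (input : String), Dom_solution input → Spec_solution input (solution input)

-- ===== LEMMAS AND PROOFS =====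
-- normalized char and transition count with given previous normalized char
def pfNorm (c : Char) : Char := if c = '0' then '0' else '1'

def pfT : Char → List Char → Int
  | _, [] => 0
  | p, c :: r => (if pfNorm c ≠ p then 1 else 0) + pfT (pfNorm c) r

lemma pfT_nonneg (p : Char) (l : List Char) : 0 ≤ pfT p l := by
  induction l generalizing p with
  | nil => simp [pfT]
  | cons c r ih =>
    have := ih (pfNorm c)
    simp only [pfT]
    split_ifs <;> omega

lemma pfFold_eq (rest : List Char) : ∀ (c : Char) (acc : Int),
    ((c :: rest).zip rest).foldl
      (fun acc p => acc + (if (decide (p.1 = '0')) ≠ (decide (p.2 = '0')) then 1 else 0)) acc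
      = acc + pfT (pfNorm c) rest := by
  induction rest with
  | nil => intro c acc; simp [pfT]
  | cons d r ih =>
    intro c acc
    simp only [List.zip_cons_cons, List.foldl_cons, ih, pfT]
    have : ((decide (c = '0')) ≠ (decide (d = '0'))) ↔ (pfNorm d ≠ pfNorm c) := by
      by_cases hc : c = '0' <;> by_cases hd : d = '0' <;> simp [pfNorm, hc, hd]
    by_cases h : (decide (c = '0')) ≠ (decide (d = '0'))
    · rw [if_pos h, if_pos (this.mp h)]; ring
    · rw [if_neg h, if_neg (fun hh => h (this.mpr hh))]; ring

lemma pfLoop_eq (l : List Char) : ∀ (z o : Int),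
    (solutionLoopA l z o (some '0') =
      min (z + pfT '0' l / 2) (o + (pfT '0' l + 1) / 2)) ∧
    (solutionLoopA l z o (some '1') =
      min (z + (pfT '1' l + 1) / 2) (o + pfT '1' l / 2)) := by
  induction l with
  | nil => intro z o; simp [solutionLoopA, pfT]
  | cons c rest ih =>
    intro z o
    by_cases hc : c = '0'
    · subst hc
      have h0 := (ih z o).1
      have h1 := (ih (z + 1) o).1
      have hn := pfT_nonneg '0' rest
      constructor
      · simp only [solutionLoopA]
        simp only [pfT, pfNorm, ne_eq, not_true_eq_false, if_false]
        simpa using h0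
      · simp only [solutionLoopA]
        simp [pfT, pfNorm, h1]
        omega
    · have h0 := (ih z (o + 1)).2
      have h1 := (ih z o).2
      have hn := pfT_nonneg '1' rest
      constructor
      · simp only [solutionLoopA, if_neg hc]
        simp [pfT, pfNorm, hc, h0]
        omega
      · simp only [solutionLoopA, if_neg hc]
        simp [pfT, pfNorm, hc, h1]

-- ===== VERDICT (by name: the statement is the Claim_ definition above) =====
theorem solution_spec : Claim_equal_solution := by
  intro input _
  unfold Spec_solution solution solution_alt
  cases hl : input.toList with
  | nil => simp [solutionLoopA]
  | cons c rest =>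
    simp only [List.tail_cons, reduceCtorEq, if_neg not_false]
    rw [pfFold_eq rest c 0, zero_add,
      PySem.Int.floordiv_eq_ediv_of_pos (a := pfT (pfNorm c) rest + 1) (by omega)]
    by_cases hc : c = '0'
    · subst hc
      simp only [solutionLoopA, ne_eq, reduceCtorEq, not_false_eq_true, if_pos trivial]
      have h := (pfLoop_eq rest (0 + 1) 0).1
      have hn := pfT_nonneg '0' rest
      rw [h]
      simp [pfNorm]
      omega
    · simp only [solutionLoopA, if_neg hc, ne_eq, reduceCtorEq, not_false_eq_true, if_pos trivial]
      have h := (pfLoop_eq rest 0 (0 + 1)).2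
      have hn := pfT_nonneg '1' rest
      rw [h]
      simp [pfNorm, hc]
      omega
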